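-- pv_equiv track=rewrite | github.com/gdkbtm/Speech_Recognition_For_Music_Recommendation | utils.py | find_highest_duplicate
-- ===== SOURCE A (Python) =====
-- from collections import Counter
--
-- def find_highest_duplicate(arr):
--     counts = Counter(arr)
--     duplicates = [item for item, count in counts.items() if count > 1]
--     no_duplicates = [item for item, count in counts.items() if count == 1]
--     if duplicates:
--         return max(duplicates)
--     else:
--         return max(no_duplicates)
-- ===== SOURCE B (Python) =====
-- from collections import Counter
--
-- def find_highest_duplicate(arr):
--     counts = Counter(arr)
--     for v in sorted(counts, reverse=True):
--         if counts[v] > 1: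
--             return v
--     return max(counts)
-- ===== Notes on version B (the rewrite author's own statement) =====
-- stated objective: alternative
-- what changed: Replaces the two partition list-comprehensions plus max() with a single descending-sorted scan over the distinct keys that returns the first duplicated value early, falling back to max of the keys when all counts are 1.
-- outside the precondition, e.g. on find_highest_duplicate([]): A raises ValueError, B raises ValueError
import Mathlib
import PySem

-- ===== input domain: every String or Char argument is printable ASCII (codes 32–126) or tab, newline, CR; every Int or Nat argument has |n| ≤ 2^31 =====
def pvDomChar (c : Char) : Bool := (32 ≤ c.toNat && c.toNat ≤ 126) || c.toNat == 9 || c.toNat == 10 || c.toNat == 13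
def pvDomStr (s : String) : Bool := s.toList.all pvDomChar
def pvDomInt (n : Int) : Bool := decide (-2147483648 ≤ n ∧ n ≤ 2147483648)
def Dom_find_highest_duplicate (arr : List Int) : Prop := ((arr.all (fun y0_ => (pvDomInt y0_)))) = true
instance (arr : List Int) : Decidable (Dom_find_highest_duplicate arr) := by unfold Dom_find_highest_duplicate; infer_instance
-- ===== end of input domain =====

-- B replaces A's two partition comprehensions + max with a descending-sorted scan over the
-- distinct keys that returns the first duplicated value, falling back to max of the keys
-- (alternative decomposition, same exact return value on nonempty lists).


-- ===== PORT A =====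
-- counts = Counter(arr); duplicates / no_duplicates partition of counts.items();
-- max([]) raises ValueError in Python: that input (arr = []) is excluded by Pre_, the
-- .getD 0 default is never reached inside Pre_.
def find_highest_duplicate (arr : List Int) : Int :=
  let counts := PySem.Dict.counter arr
  let duplicates := (counts.items.filter (fun p => decide (1 < p.2))).map (fun p => p.1)
  let no_duplicates := (counts.items.filter (fun p => decide (p.2 = 1))).map (fun p => p.1)
  if duplicates ≠ [] then
    (PySem.List.max? duplicates (fun x => x)).getD 0
  else
    (PySem.List.max? no_duplicates (fun x => x)).getD 0

-- ===== PORT B =====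
-- counts = Counter(arr); for v in sorted(counts, reverse=True): if counts[v] > 1: return v
-- (the early-returning for-loop is List.find? = first element satisfying the test);
-- return max(counts)  -- raises on empty, excluded by Pre_ (.getD 0 never reached).
def find_highest_duplicate_alt (arr : List Int) : Int :=
  let counts := PySem.Dict.counter arr
  match (PySem.List.sorted counts.keys (fun x => x) true).find?
      (fun v => decide (1 < counts.getD v 0)) with
  | some v => v
  | none => (PySem.List.max? counts.keys (fun x => x)).getD 0

-- ===== PRECONDITION & SPEC =====
-- Pre_ excludes exactly arr = [], on which Python A raises ValueError (max of empty sequence).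
def Pre_find_highest_duplicate (arr : List Int) : Prop := arr ≠ []
instance (arr : List Int) : Decidable (Pre_find_highest_duplicate arr) := by
  unfold Pre_find_highest_duplicate; infer_instance
def pvWitness_find_highest_duplicate : List Int := [3, 1, 3, 2]

def Spec_find_highest_duplicate (arr : List Int) (out : Int) : Prop := out = find_highest_duplicate_alt arr
instance (arr : List Int) (out : Int) : Decidable (Spec_find_highest_duplicate arr out) := by unfold Spec_find_highest_duplicate; infer_instance

-- ===== CLAIM (what is proved, stated in full; the proofs are below) =====
def Claim_equal_find_highest_duplicate : Prop := ∀ (arr : List Int), Dom_find_highest_duplicate arr → Pre_find_highest_duplicate arr → Spec_find_highest_duplicate arr (find_highest_duplicate arr)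

-- ===== LEMMAS AND PROOFS =====

-- ===== VERDICT (by name: the statement is the Claim_ definition above) =====

theorem find_highest_duplicate_spec : Claim_equal_find_highest_duplicate := by
  intro arr _hdom hne
  unfold Spec_find_highest_duplicate find_highest_duplicate find_highest_duplicate_alt
  simp only [PySem.Dict.items_counter, PySem.Dict.keys_counter, PySem.Dict.getD_counter,
    List.filter_map, List.map_map]
  simp only [Function.comp_def, List.map_id']
  rw [← List.head?_filter]
  have hperm : ((PySem.List.sorted (PySem.Set.ofList arr) (fun x => x) true).filter
      (fun v => decide (1 < (List.count v arr : Int)))).Perm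
      ((PySem.Set.ofList arr).filter (fun v => decide (1 < (List.count v arr : Int)))) :=
    (PySem.List.sorted_perm (PySem.Set.ofList arr) (fun x => x) true).filter _
  by_cases hdup : (PySem.Set.ofList arr).filter
      (fun v => decide (1 < (List.count v arr : Int))) = []
  · -- all distinct values occur exactly once
    rw [if_neg (not_not_intro hdup)]
    have hnil : ((PySem.List.sorted (PySem.Set.ofList arr) (fun x => x) true).filter
        (fun v => decide (1 < (List.count v arr : Int)))) = [] :=
      List.Perm.eq_nil (hdup ▸ hperm)
    rw [hnil]
    have hself : (PySem.Set.ofList arr).filter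
        (fun v => decide ((List.count v arr : Int) = 1)) = PySem.Set.ofList arr := by
      apply List.filter_eq_self.mpr
      intro a ha
      have hle := List.filter_eq_nil_iff.mp hdup a ha
      have hmem : a ∈ arr := (PySem.Set.mem_ofList arr a).mp ha
      have hpos : 0 < arr.count a := List.count_pos_iff.mpr hmem
      simp only [decide_eq_true_eq] at hle ⊢
      omega
    rw [hself]
    rfl
  · -- there is a duplicated value: both sides return its maximum
    rw [if_pos hdup]
    obtain ⟨m, hm⟩ : ∃ m, PySem.List.max? ((PySem.Set.ofList arr).filter
        (fun v => decide (1 < (List.count v arr : Int)))) (fun x => x) = some m := by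
      cases h : PySem.List.max? ((PySem.Set.ofList arr).filter
          (fun v => decide (1 < (List.count v arr : Int)))) (fun x => x) with
      | none => exact absurd ((PySem.List.max?_eq_none_iff _ _).mp h) hdup
      | some m => exact ⟨m, rfl⟩
    rw [hm]
    cases hfs : ((PySem.List.sorted (PySem.Set.ofList arr) (fun x => x) true).filter
        (fun v => decide (1 < (List.count v arr : Int)))) with
    | nil => exact absurd (hfs ▸ hperm).symm.eq_nil hdup
    | cons h t =>
      have hsorted := (PySem.List.sorted_pairwise_rev (PySem.Set.ofList arr)
        (fun x => x) (κ := Int)).filter (fun v => decide (1 < (List.count v arr : Int)))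
      rw [hfs] at hsorted hperm
      have hmax := PySem.List.max?_isMax hm
      have hhm : h ≤ m := hmax h (hperm.mem_iff.mp (List.mem_cons_self))
      have hmh : m ≤ h := by
        have hmmem : m ∈ h :: t := hperm.mem_iff.mpr (PySem.List.max?_mem hm)
        rcases List.mem_cons.mp hmmem with h1 | h1
        · exact le_of_eq h1
        · exact (List.pairwise_cons.mp hsorted).1 m h1
      simp [le_antisymm hhm hmh]
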